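-- pv_equiv track=rewrite | github.com/vishal13230/SearchToLearn | level_names.py | get_level_names
-- ===== SOURCE A (Python) =====
-- def get_level_names(skill):
--     skill_lower = skill.lower()
--     if any(keyword in skill_lower for keyword in ["coding", "programming", "python", "java", "javascript", "software", "web development", "data science"]):
--         return ("Syntax & Basics", "Object-Oriented Programming", "Advanced Frameworks"), " (Levels: Syntax & Basics, Object-Oriented Programming, Advanced Frameworks)"
--     elif any(keyword in skill_lower for keyword in ["music", "guitar", "piano", "singing", "violin"]):
--         return ("Fundamentals", "Technique", "Performance"), " (Levels: Fundamentals, Technique, Performance)"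
--     elif any(keyword in skill_lower for keyword in ["art", "drawing", "painting", "sculpture", "design"]):
--         return ("Sketching & Form", "Color Theory", "Advanced Techniques"), " (Levels: Sketching & Form, Color Theory, Advanced Techniques)"
--     elif any(keyword in skill_lower for keyword in ["writing", "creative writing", "blogging", "journalism"]):
--         return ("Grammar and Style", "Storytelling Techniques", "Publishing Strategies"), " (Levels: Grammar and Style, Storytelling Techniques, Publishing Strategies)"
--     elif any(keyword in skill_lower for keyword in ["language", "spanish", "french", "german", "english"]):
--         return ("Conversational Basics", "Fluency & Grammar", "Native-Level Proficiency"), " (Levels: Conversational Basics, Fluency & Grammar, Native-Level Proficiency)"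
--     else:
--         return ("Foundation", "Core", "Mastery"), " (Levels: Foundation, Core, Mastery)"
-- ===== SOURCE B (Python) =====
-- # Flat keyword->category-index map scanned once with a running minimum-index accumulator,
-- # instead of an ordered if-elif cascade per category; the label is built by join.
-- KEYWORD_INDEX = {
--     "coding": 0, "programming": 0, "python": 0, "java": 0, "javascript": 0,
--     "software": 0, "web development": 0, "data science": 0,
--     "music": 1, "guitar": 1, "piano": 1, "singing": 1, "violin": 1,
--     "art": 2, "drawing": 2, "painting": 2, "sculpture": 2, "design": 2,
--     "writing": 3, "creative writing": 3, "blogging": 3, "journalism": 3,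
--     "language": 4, "spanish": 4, "french": 4, "german": 4, "english": 4,
-- }
--
-- LEVELS = [
--     ("Syntax & Basics", "Object-Oriented Programming", "Advanced Frameworks"),
--     ("Fundamentals", "Technique", "Performance"),
--     ("Sketching & Form", "Color Theory", "Advanced Techniques"),
--     ("Grammar and Style", "Storytelling Techniques", "Publishing Strategies"),
--     ("Conversational Basics", "Fluency & Grammar", "Native-Level Proficiency"),
--     ("Foundation", "Core", "Mastery"),
-- ]
--
-- def get_level_names(skill):
--     s = skill.lower()
--     idx = 5
--     for kw, i in KEYWORD_INDEX.items():
--         if kw in s and i < idx: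
--             idx = i
--     lv = LEVELS[idx]
--     return lv, " (Levels: " + ", ".join(lv) + ")"
-- ===== Notes on version B (the rewrite author's own statement) =====
-- stated objective: alternative
-- what changed: Replaces the per-category if-elif cascade of short-circuiting any() scans by a single flat keyword-to-category-index map traversed once with a running minimum-index accumulator; the winning index selects the levels tuple and the label is built with a comma-space join instead of duplicated literals.
import Mathlib
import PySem

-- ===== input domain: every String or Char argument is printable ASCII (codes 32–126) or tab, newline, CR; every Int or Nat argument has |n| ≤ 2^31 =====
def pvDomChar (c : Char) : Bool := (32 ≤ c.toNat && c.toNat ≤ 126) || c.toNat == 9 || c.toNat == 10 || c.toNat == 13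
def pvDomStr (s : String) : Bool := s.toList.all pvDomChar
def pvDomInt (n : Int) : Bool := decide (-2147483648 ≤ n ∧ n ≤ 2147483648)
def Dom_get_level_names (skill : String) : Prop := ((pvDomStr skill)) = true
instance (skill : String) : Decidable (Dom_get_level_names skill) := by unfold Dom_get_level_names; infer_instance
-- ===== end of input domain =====

-- B replaces A's five-way if-elif cascade of any() scans by one flat keyword→category-index map
-- scanned once with a minimum-index accumulator; the label is built by join (objective: alternative).

-- ===== PORT A =====
def get_level_names (skill : String) : List String × String :=
  let skill_lower := PySem.Str.lower skill
  if (["coding", "programming", "python", "java", "javascript", "software", "web development", "data science"].any (fun k => PySem.Str.isIn k skill_lower)) then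
    (["Syntax & Basics", "Object-Oriented Programming", "Advanced Frameworks"], " (Levels: Syntax & Basics, Object-Oriented Programming, Advanced Frameworks)")
  else if (["music", "guitar", "piano", "singing", "violin"].any (fun k => PySem.Str.isIn k skill_lower)) then
    (["Fundamentals", "Technique", "Performance"], " (Levels: Fundamentals, Technique, Performance)")
  else if (["art", "drawing", "painting", "sculpture", "design"].any (fun k => PySem.Str.isIn k skill_lower)) then
    (["Sketching & Form", "Color Theory", "Advanced Techniques"], " (Levels: Sketching & Form, Color Theory, Advanced Techniques)")
  else if (["writing", "creative writing", "blogging", "journalism"].any (fun k => PySem.Str.isIn k skill_lower)) then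
    (["Grammar and Style", "Storytelling Techniques", "Publishing Strategies"], " (Levels: Grammar and Style, Storytelling Techniques, Publishing Strategies)")
  else if (["language", "spanish", "french", "german", "english"].any (fun k => PySem.Str.isIn k skill_lower)) then
    (["Conversational Basics", "Fluency & Grammar", "Native-Level Proficiency"], " (Levels: Conversational Basics, Fluency & Grammar, Native-Level Proficiency)")
  else
    (["Foundation", "Core", "Mastery"], " (Levels: Foundation, Core, Mastery)")

-- ===== PORT B =====
def keywordIndex : List (String × Nat) :=
  [ ("coding", 0), ("programming", 0), ("python", 0), ("java", 0), ("javascript", 0),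
    ("software", 0), ("web development", 0), ("data science", 0),
    ("music", 1), ("guitar", 1), ("piano", 1), ("singing", 1), ("violin", 1),
    ("art", 2), ("drawing", 2), ("painting", 2), ("sculpture", 2), ("design", 2),
    ("writing", 3), ("creative writing", 3), ("blogging", 3), ("journalism", 3),
    ("language", 4), ("spanish", 4), ("french", 4), ("german", 4), ("english", 4) ]

def levelsTable : List (List String) :=
  [ ["Syntax & Basics", "Object-Oriented Programming", "Advanced Frameworks"],
    ["Fundamentals", "Technique", "Performance"],
    ["Sketching & Form", "Color Theory", "Advanced Techniques"],
    ["Grammar and Style", "Storytelling Techniques", "Publishing Strategies"],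
    ["Conversational Basics", "Fluency & Grammar", "Native-Level Proficiency"],
    ["Foundation", "Core", "Mastery"] ]

def get_level_names_alt (skill : String) : List String × String :=
  let s := PySem.Str.lower skill
  let idx := keywordIndex.foldl (fun m p => if PySem.Str.isIn p.1 s ∧ p.2 < m then p.2 else m) 5
  let lv := levelsTable.getD idx []
  (lv, " (Levels: " ++ PySem.Str.join ", " lv ++ ")")

-- ===== PRECONDITION & SPEC =====
def Spec_get_level_names (skill : String) (out : List String × String) : Prop := out = get_level_names_alt skill
instance (skill : String) (out : List String × String) : Decidable (Spec_get_level_names skill out) := by unfold Spec_get_level_names; infer_instance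

-- ===== CLAIM (what is proved, stated in full; the proofs are below) =====
def Claim_equal_get_level_names : Prop := ∀ (skill : String), Dom_get_level_names skill → Spec_get_level_names skill (get_level_names skill)

-- ===== LEMMAS AND PROOFS =====

-- the flat keyword map, regrouped by category for the proof
lemma keywordIndex_eq :
    keywordIndex =
      (["coding", "programming", "python", "java", "javascript", "software", "web development", "data science"].map (fun k => (k, 0)))
      ++ (["music", "guitar", "piano", "singing", "violin"].map (fun k => (k, 1)))
      ++ (["art", "drawing", "painting", "sculpture", "design"].map (fun k => (k, 2)))
      ++ (["writing", "creative writing", "blogging", "journalism"].map (fun k => (k, 3)))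
      ++ (["language", "spanish", "french", "german", "english"].map (fun k => (k, 4))) := rfl

-- folding the min-accumulator step over one category's keywords
lemma foldl_minstep (s : String) (g : List String) (i : Nat) (m : Nat) :
    (g.map (fun k => (k, i))).foldl (fun m p => if PySem.Str.isIn p.1 s ∧ p.2 < m then p.2 else m) m
      = if g.any (fun k => PySem.Str.isIn k s) then min m i else m := by
  induction g generalizing m with
  | nil => simp
  | cons a t ih =>
      simp only [List.map_cons, List.foldl_cons, List.any_cons, ih]
      by_cases h : PySem.Str.isIn a s = true <;>
        simp only [h, Bool.true_or, Bool.false_or, true_and,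
          Bool.false_eq_true, false_and, if_true, if_false, Nat.min_def] <;>
        split_ifs <;> omega

-- ===== VERDICT (by name: the statement is the Claim_ definition above) =====
theorem get_level_names_spec : Claim_equal_get_level_names := by
  intro skill _
  unfold Spec_get_level_names get_level_names get_level_names_alt
  rw [keywordIndex_eq]
  simp only [List.foldl_append, foldl_minstep]
  generalize PySem.Str.lower skill = s
  split_ifs <;> rfl
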